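-- pv_equiv track=rewrite | github.com/catanadj/taskwarrior-nautical | nautical_core/__init__.py | _describe_term_roll_shift
-- ===== SOURCE A (Python) =====
-- def _describe_term_roll_shift(term) -> str | None:
--     saw = set()
--     for a in term:
--         roll = (a.get("mods") or {}).get("roll")
--         if roll in ("nw", "pbd", "nbd"):
--             saw.add(roll)
--     if "nw" in saw:
--         return "nw"
--     if "pbd" in saw:
--         return "pbd"
--     if "nbd" in saw:
--         return "nbd"
--     return None
-- ===== SOURCE B (Python) =====
-- def _describe_term_roll_shift(term) -> str | None:
--     for marker in ("nw", "pbd", "nbd"):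
--         if any((a.get("mods") or {}).get("roll") == marker for a in term):
--             return marker
--     return None
-- ===== Notes on version B (the rewrite author's own statement) =====
-- stated objective: simpler
-- what changed: Replaces 'accumulate every seen marker into a set, then test the three priorities against it' with a direct search: for each priority marker in order, scan the term and return the first marker that occurs; no set is built.
import Mathlib
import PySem

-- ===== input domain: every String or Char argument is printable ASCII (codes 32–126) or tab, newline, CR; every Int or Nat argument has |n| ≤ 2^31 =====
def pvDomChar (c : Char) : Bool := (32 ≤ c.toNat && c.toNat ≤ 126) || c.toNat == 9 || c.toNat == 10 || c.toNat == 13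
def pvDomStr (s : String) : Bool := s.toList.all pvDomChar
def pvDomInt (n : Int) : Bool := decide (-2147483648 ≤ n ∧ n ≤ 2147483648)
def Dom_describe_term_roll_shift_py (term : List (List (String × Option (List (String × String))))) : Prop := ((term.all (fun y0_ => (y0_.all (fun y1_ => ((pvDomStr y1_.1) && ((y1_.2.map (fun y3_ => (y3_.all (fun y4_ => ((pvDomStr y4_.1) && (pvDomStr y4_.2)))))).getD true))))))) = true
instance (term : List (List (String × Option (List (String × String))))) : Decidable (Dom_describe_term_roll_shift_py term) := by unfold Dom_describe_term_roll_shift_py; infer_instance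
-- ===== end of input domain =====

-- B: search the term once per priority marker, returning the first that occurs, instead of building a set of seen markers (simpler decomposition; same cost).
-- ===== PORT A =====
def pvRoll (a : List (String × Option (List (String × String)))) : Option String :=
  -- (a.get("mods") or {}).get("roll"): a missing key, a None value and an empty dict all act as {}
  PySem.Dict.get?
    (match PySem.Dict.get? (PySem.Dict.mk a) "mods" with
      | some (some d) => PySem.Dict.mk d
      | _ => PySem.Dict.empty)
    "roll"

def describe_term_roll_shift_py (term : List (List (String × Option (List (String × String))))) : Option String :=
  let saw : PySem.Set String :=
    term.foldl (fun s a =>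
      match pvRoll a with
      | some r => if r = "nw" ∨ r = "pbd" ∨ r = "nbd" then PySem.Set.add s r else s
      | none => s) PySem.Set.empty
  if PySem.Set.contains saw "nw" then some "nw"
  else if PySem.Set.contains saw "pbd" then some "pbd"
  else if PySem.Set.contains saw "nbd" then some "nbd"
  else none

-- ===== PORT B =====
def pvScanMarkers (markers : List String) (term : List (List (String × Option (List (String × String))))) : Option String :=
  match markers with
  | [] => none
  | m :: rest => if term.any (fun a => pvRoll a == some m) then some m else pvScanMarkers rest term

def describe_term_roll_shift_py_alt (term : List (List (String × Option (List (String × String))))) : Option String :=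
  pvScanMarkers ["nw", "pbd", "nbd"] term

-- ===== PRECONDITION & SPEC =====
def Spec_describe_term_roll_shift_py (term : List (List (String × Option (List (String × String))))) (out : Option String) : Prop := out = describe_term_roll_shift_py_alt term
instance (term : List (List (String × Option (List (String × String))))) (out : Option String) : Decidable (Spec_describe_term_roll_shift_py term out) := by unfold Spec_describe_term_roll_shift_py; infer_instance

-- ===== CLAIM (what is proved, stated in full; the proofs are below) =====
def Claim_equal_describe_term_roll_shift_py : Prop := ∀ (term : List (List (String × Option (List (String × String))))), Dom_describe_term_roll_shift_py term → Spec_describe_term_roll_shift_py term (describe_term_roll_shift_py term)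

-- ===== LEMMAS AND PROOFS =====
lemma pvContains_fold (term : List (List (String × Option (List (String × String)))))
    (s : PySem.Set String) (m : String) :
    (PySem.Set.contains
      (term.foldl (fun s a =>
        match pvRoll a with
        | some r => if r = "nw" ∨ r = "pbd" ∨ r = "nbd" then PySem.Set.add s r else s
        | none => s) s) m = true) ↔
      (PySem.Set.contains s m = true ∨
        ((m = "nw" ∨ m = "pbd" ∨ m = "nbd") ∧ term.any (fun a => pvRoll a == some m) = true)) := by
  induction term generalizing s with
  | nil => simp
  | cons a rest ih =>
    simp only [List.foldl_cons, List.any_cons, ih, PySem.Set.contains_iff]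
    cases h : pvRoll a with
    | none => simp
    | some r =>
      by_cases hr : r = "nw" ∨ r = "pbd" ∨ r = "nbd"
      · simp only [if_pos hr, PySem.Set.mem_add, beq_iff_eq, Option.some.injEq, Bool.or_eq_true]
        constructor
        · rintro (⟨hm | hm⟩ | ⟨ht, hany⟩)
          · exact Or.inl hm
          · subst hm; exact Or.inr ⟨hr, Or.inl (by simp)⟩
          · exact Or.inr ⟨ht, Or.inr hany⟩
        · rintro (hm | ⟨ht, hmr | hany⟩)
          · exact Or.inl (Or.inl hm)
          · exact Or.inl (Or.inr hmr.symm)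
          · exact Or.inr ⟨ht, hany⟩
      · simp only [if_neg hr, beq_iff_eq, Option.some.injEq, Bool.or_eq_true]
        constructor
        · rintro (hm | ⟨ht, hany⟩)
          · exact Or.inl hm
          · exact Or.inr ⟨ht, Or.inr hany⟩
        · rintro (hm | ⟨ht, hmr | hany⟩)
          · exact Or.inl hm
          · subst hmr; exact absurd ht hr
          · exact Or.inr ⟨ht, hany⟩

lemma pvContains_empty_fold (term : List (List (String × Option (List (String × String))))) (m : String)
    (hm : m = "nw" ∨ m = "pbd" ∨ m = "nbd") :
    (PySem.Set.contains
      (term.foldl (fun s a =>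
        match pvRoll a with
        | some r => if r = "nw" ∨ r = "pbd" ∨ r = "nbd" then PySem.Set.add s r else s
        | none => s) PySem.Set.empty) m) = term.any (fun a => pvRoll a == some m) := by
  rcases h : term.any (fun a => pvRoll a == some m) with _ | _
  · simp only [Bool.eq_false_iff, ne_eq]
    intro hc
    rcases (pvContains_fold term PySem.Set.empty m).1 hc with hc' | ⟨_, hany⟩
    · simp [PySem.Set.empty] at hc'
    · rw [h] at hany; exact Bool.false_ne_true hany
  · exact (pvContains_fold term PySem.Set.empty m).2 (Or.inr ⟨hm, h⟩)


-- ===== VERDICT (by name: the statement is the Claim_ definition above) =====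
theorem describe_term_roll_shift_py_spec : Claim_equal_describe_term_roll_shift_py := by
  intro term _
  unfold Spec_describe_term_roll_shift_py describe_term_roll_shift_py describe_term_roll_shift_py_alt pvScanMarkers
  simp only [pvContains_empty_fold term "nw" (Or.inl rfl),
             pvContains_empty_fold term "pbd" (Or.inr (Or.inl rfl)),
             pvContains_empty_fold term "nbd" (Or.inr (Or.inr rfl))]
  simp [pvScanMarkers]
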